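-- pv_equiv track=rewrite | github.com/KarolBurczyk/CoursesUwr | 6 sem/SI/Lista1/z5.py | count_hash_blocks
-- ===== SOURCE A (Python) =====
-- def count_hash_blocks(s):
--     blocks = []
--     count = 0
--
--     for char in s:
--         if char == '#':
--             count += 1
--         elif count > 0:
--             blocks.append(count)
--             count = 0
--
--     if count > 0:
--         blocks.append(count)
--
--     return blocks
-- ===== SOURCE B (Python) =====
-- def count_hash_blocks(s):
--     # Extract maximal runs of equal characters (a groupby-style scan),
--     # then keep the lengths of the '#' runs.
--     runs = []
--     i = 0
--     n = len(s)
--     while i < n: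
--         j = i + 1
--         while j < n and s[j] == s[i]:
--             j += 1
--         runs.append((s[i], j - i))
--         i = j
--     return [length for ch, length in runs if ch == '#']
-- ===== Notes on version B (the rewrite author's own statement) =====
-- stated objective: alternative
-- what changed: Replaces A's single-pass counter/flush state machine with a run-length decomposition: group the string into maximal runs of equal characters, then keep the lengths of the '#' runs.
import Mathlib
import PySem

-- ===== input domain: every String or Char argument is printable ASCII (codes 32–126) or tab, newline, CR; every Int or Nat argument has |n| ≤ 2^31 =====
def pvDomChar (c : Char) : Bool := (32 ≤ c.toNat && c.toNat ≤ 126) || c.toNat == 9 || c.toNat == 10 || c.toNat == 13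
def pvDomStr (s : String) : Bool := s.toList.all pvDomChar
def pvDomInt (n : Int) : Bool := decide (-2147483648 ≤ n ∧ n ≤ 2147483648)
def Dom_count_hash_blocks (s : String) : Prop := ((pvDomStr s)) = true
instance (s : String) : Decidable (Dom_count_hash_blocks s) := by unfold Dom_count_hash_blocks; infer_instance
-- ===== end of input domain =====

-- B replaces A's counter/flush state machine with a run-length decomposition
-- (group maximal equal-character runs, keep the '#' run lengths); alternative, same cost.


-- ===== PORT A =====
-- the for-loop over the characters, state = (blocks, count)
def chbLoop : List Char → List Int → Int → List Int × Int
  | [], blocks, count => (blocks, count)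
  | c :: rest, blocks, count =>
    if c = '#' then chbLoop rest blocks (count + 1)
    else if count > 0 then chbLoop rest (blocks ++ [count]) 0
    else chbLoop rest blocks count

def count_hash_blocks (s : String) : List Int :=
  let r := chbLoop s.toList [] 0
  if r.2 > 0 then r.1 ++ [r.2] else r.1

-- ===== PORT B =====
-- maximal runs of equal characters: (char, run length) in order
def chbRuns : List Char → List (Char × Int)
  | [] => []
  | c :: rest =>
    let p := rest.span (· = c)
    (c, 1 + (p.1.length : Int)) :: chbRuns p.2
termination_by l => l.length
decreasing_by
  simp only [List.span_eq_takeWhile_dropWhile, List.length_cons]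
  exact Nat.lt_succ_of_le (List.length_dropWhile_le _ _)

def count_hash_blocks_alt (s : String) : List Int :=
  ((chbRuns s.toList).filter (fun r => r.1 = '#')).map (fun r => r.2)

-- ===== PRECONDITION & SPEC =====
def Spec_count_hash_blocks (s : String) (out : List Int) : Prop := out = count_hash_blocks_alt s
instance (s : String) (out : List Int) : Decidable (Spec_count_hash_blocks s out) := by unfold Spec_count_hash_blocks; infer_instance

-- ===== CLAIM (what is proved, stated in full; the proofs are below) =====
def Claim_equal_count_hash_blocks : Prop := ∀ (s : String), Dom_count_hash_blocks s → Spec_count_hash_blocks s (count_hash_blocks s)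

-- ===== LEMMAS AND PROOFS =====

-- proof-side characterisation of A's loop result (blocks dropped, final flush folded in)
def chbG : List Char → Int → List Int
  | [], count => if count > 0 then [count] else []
  | c :: rest, count =>
    if c = '#' then chbG rest (count + 1)
    else if count > 0 then count :: chbG rest 0
    else chbG rest count

theorem chbLoop_flush (l : List Char) (blocks : List Int) (count : Int) :
    (if (chbLoop l blocks count).2 > 0
      then (chbLoop l blocks count).1 ++ [(chbLoop l blocks count).2]
      else (chbLoop l blocks count).1) = blocks ++ chbG l count := by
  induction l generalizing blocks count with
  | nil => simp only [chbLoop, chbG]; split <;> simp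
  | cons c rest ih =>
    by_cases h1 : c = '#'
    · simp only [chbLoop, chbG, if_pos h1]
      exact ih blocks (count + 1)
    · by_cases h2 : count > 0
      · simp only [chbLoop, chbG, if_neg h1, if_pos h2]
        rw [ih (blocks ++ [count]) 0]
        simp
      · simp only [chbLoop, chbG, if_neg h1, if_neg h2]
        exact ih blocks count

-- unfolded form of chbRuns on a cons
theorem chbRuns_cons (c : Char) (rest : List Char) :
    chbRuns (c :: rest) =
      (c, 1 + ((rest.takeWhile (· = c)).length : Int)) :: chbRuns (rest.dropWhile (· = c)) := by
  rw [chbRuns]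
  simp [List.span_eq_takeWhile_dropWhile]

-- processing a run of k '#'s with positive counter
theorem chbG_hash_run (k : Nat) (others : List Char) (count : Int) (h : 0 < count)
    (hd : ∀ d t, others = d :: t → d ≠ '#') :
    chbG (List.replicate k '#' ++ others) count = (count + k) :: chbG others 0 := by
  induction k generalizing count with
  | zero =>
    simp only [List.replicate, List.nil_append, Int.natCast_zero, Int.add_zero]
    cases others with
    | nil => simp [chbG, h]
    | cons d t =>
      have hd' : d ≠ '#' := hd d t rfl
      simp [chbG, hd', h]
  | succ n ih =>
    simp only [List.replicate_succ, List.cons_append, chbG, if_pos]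
    rw [ih (count + 1) (by omega)]
    have hcast : count + 1 + (n : Int) = count + ((n + 1 : Nat) : Int) := by push_cast; ring
    rw [hcast]

-- processing a run of non-'#' characters with counter 0 is a no-op
theorem chbG_skip (same : List Char) (others : List Char)
    (h : ∀ x ∈ same, x ≠ '#') :
    chbG (same ++ others) 0 = chbG others 0 := by
  induction same with
  | nil => rfl
  | cons c rest ih =>
    have hc : c ≠ '#' := h c (by simp)
    simp only [List.cons_append, chbG, if_neg hc]
    simp only [show ¬((0:Int) > 0) by omega, if_false]
    exact ih (fun x hx => h x (by simp [hx]))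

theorem dropWhile_head_not {p : Char → Bool} (l : List Char) (d : Char) (t : List Char)
    (h : l.dropWhile p = d :: t) : p d = false := by
  induction l with
  | nil => simp [List.dropWhile] at h
  | cons c rest ih =>
    by_cases hc : p c
    · simp [List.dropWhile, hc] at h; exact ih h
    · simp [List.dropWhile, hc] at h
      rw [← h.1]; simpa using hc

theorem chbG_eq_runs (l : List Char) :
    chbG l 0 = ((chbRuns l).filter (fun r => r.1 = '#')).map (fun r => r.2) := by
  generalize hn : l.length = n
  induction n using Nat.strong_induction_on generalizing l with
  | _ n ih =>
    cases l with
    | nil => simp [chbRuns, chbG]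
    | cons c rest =>
      have hlen : (rest.dropWhile (· = c)).length < n := by
        subst hn
        exact Nat.lt_succ_of_le (List.length_dropWhile_le _ _)
      have ih' := ih _ hlen (rest.dropWhile (· = c)) rfl
      have htake : ∀ x ∈ rest.takeWhile (· = c), x = c := by
        intro x hx
        simpa using List.mem_takeWhile_imp hx
      have hdrop : ∀ d t, rest.dropWhile (· = c) = d :: t → d ≠ c := by
        intro d t h
        simpa using dropWhile_head_not (p := (· = c)) rest d t h
      have hsplit : rest = rest.takeWhile (· = c) ++ rest.dropWhile (· = c) :=
        (List.takeWhile_append_dropWhile).symm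
      rw [chbRuns_cons]
      by_cases hc : c = '#'
      · subst hc
        have hrep : rest.takeWhile (· = '#')
            = List.replicate (rest.takeWhile (· = '#')).length '#' :=
          List.eq_replicate_of_mem htake
        rw [show chbG ('#' :: rest) 0 = chbG rest 1 by simp [chbG]]
        conv_lhs => rw [hsplit, hrep]
        rw [chbG_hash_run _ _ 1 (by omega) hdrop, ih']
        simp
      · rw [show chbG (c :: rest) 0 = chbG rest 0 by simp [chbG, hc]]
        conv_lhs => rw [hsplit]
        rw [chbG_skip _ _ (fun x hx => by rw [htake x hx]; exact hc), ih']
        simp [hc]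

-- ===== VERDICT (by name: the statement is the Claim_ definition above) =====
theorem count_hash_blocks_spec : Claim_equal_count_hash_blocks := by
  intro s _
  unfold Spec_count_hash_blocks count_hash_blocks count_hash_blocks_alt
  rw [← chbG_eq_runs]
  simpa using chbLoop_flush s.toList [] 0
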